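-- pv_equiv track=rewrite | github.com/hasanjafri/DailyCodingProblems | #1293/num_playlists.py | num_playlists
-- ===== SOURCE A (Python) =====
-- def num_playlists(N, M, B):
--     dp = [[0 for _ in range(N + 1)] for _ in range(M + 1)]
--     dp[0][0] = 1
--     for i in range(1, M + 1):
--         for j in range(1, N + 1):
--             if j > i:
--                 dp[i][j] = 0
--             elif j <= B:
--                 dp[i][j] = dp[i - 1][j - 1] * (j) + dp[i - 1][j] * (N - j)
--             else:
--                 dp[i][j] = dp[i - 1][j - 1] * (j - B) + dp[i - 1][j] * (N - j)
--     return dp[M][N]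
-- ===== SOURCE B (Python) =====
-- from math import comb, factorial
--
--
-- def num_playlists(N, M, B):
--     # Closed form: the DP's answer factors into (product of the per-new-song
--     # coefficients) times a Stirling-like alternating sum, O(N log M) arithmetic.
--     if N == 0:
--         return 1 if M == 0 else 0
--     if M < N:
--         return 0
--     P = 1
--     for j in range(1, N + 1):
--         P *= j if j <= B else j - B
--     s = sum((-1) ** k * comb(N - 1, k) * (N - 1 - k) ** (M - 1) for k in range(N))
--     return P * s // factorial(N - 1)
-- ===== Notes on version B (the rewrite author's own statement) =====
-- stated objective: faster
-- what changed: Replaces the O(M*N) dynamic-programming table with a closed form: a product of the N per-new-song coefficients times an inclusion-exclusion (Stirling-number) alternating sum with fast exponentiation, divided by (N-1)!.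
import Mathlib
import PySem

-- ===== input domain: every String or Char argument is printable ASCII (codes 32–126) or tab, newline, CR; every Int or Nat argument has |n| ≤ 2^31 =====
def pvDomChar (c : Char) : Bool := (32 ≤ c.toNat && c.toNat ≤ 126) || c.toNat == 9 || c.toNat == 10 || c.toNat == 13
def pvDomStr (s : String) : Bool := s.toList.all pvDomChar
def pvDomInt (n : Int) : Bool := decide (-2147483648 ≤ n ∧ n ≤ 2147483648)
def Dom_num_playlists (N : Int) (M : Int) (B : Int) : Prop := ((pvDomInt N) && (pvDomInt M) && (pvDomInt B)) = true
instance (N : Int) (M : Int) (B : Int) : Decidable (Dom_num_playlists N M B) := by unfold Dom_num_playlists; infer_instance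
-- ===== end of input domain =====

-- B replaces A's O(M*N) DP table with a closed form (coefficient product × an
-- inclusion-exclusion alternating sum, divided by (N-1)!), asymptotically faster.

-- ===== PORT A =====
-- dp[i][j] read/write helpers: under Pre_ every index is nonnegative and in
-- range, where Python list indexing returns/assigns exactly this (no IndexError).
def pyA_get2 (dp : List (List Int)) (i j : Int) : Int :=
  (dp.getD i.toNat []).getD j.toNat 0

def pyA_set2 (dp : List (List Int)) (i j : Int) (v : Int) : List (List Int) :=
  dp.set i.toNat ((dp.getD i.toNat []).set j.toNat v)

-- body of the inner 'for j in range(1, N + 1)' loop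
def pyA_inner (N B i : Int) (dp : List (List Int)) (j : Int) : List (List Int) :=
  if j > i then pyA_set2 dp i j 0
  else if j ≤ B then
    pyA_set2 dp i j (pyA_get2 dp (i-1) (j-1) * j + pyA_get2 dp (i-1) j * (N - j))
  else
    pyA_set2 dp i j (pyA_get2 dp (i-1) (j-1) * (j - B) + pyA_get2 dp (i-1) j * (N - j))

-- body of the outer 'for i in range(1, M + 1)' loop
def pyA_outer (N B : Int) (dp : List (List Int)) (i : Int) : List (List Int) :=
  (PySem.List.pyRange 1 (N+1) 1).foldl (pyA_inner N B i) dp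

def num_playlists (N : Int) (M : Int) (B : Int) : Int :=
  let dp0 := (PySem.List.pyRange 0 (M+1) 1).map
    (fun _ => (PySem.List.pyRange 0 (N+1) 1).map (fun _ => (0:Int)))
  let dp1 := pyA_set2 dp0 0 0 1
  let dp2 := (PySem.List.pyRange 1 (M+1) 1).foldl (pyA_outer N B) dp1
  pyA_get2 dp2 M N

-- ===== PORT B =====
def num_playlists_alt (N : Int) (M : Int) (B : Int) : Int :=
  if N = 0 then (if M = 0 then 1 else 0)
  else if M < N then 0
  else
    let P := (PySem.List.pyRange 1 (N+1) 1).foldl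
      (fun P j => P * (if j ≤ B then j else j - B)) 1
    let s := ((PySem.List.pyRange 0 N 1).map
      (fun k => (-1)^k.toNat * ((N-1).toNat.choose k.toNat : Int) * (N-1-k)^(M-1).toNat)).sum
    PySem.Int.floordiv (P * s) ((Nat.factorial (N-1).toNat : Int))

-- ===== PRECONDITION & SPEC =====
-- Pre_ excludes exactly the inputs where A raises IndexError: N < 0 makes every
-- row empty and M < 0 makes the table empty, so dp[0][0] = 1 fails.
def Pre_num_playlists (N : Int) (M : Int) (B : Int) : Prop := 0 ≤ N ∧ 0 ≤ M
instance (N : Int) (M : Int) (B : Int) : Decidable (Pre_num_playlists N M B) := by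
  unfold Pre_num_playlists; infer_instance

def pvWitness_num_playlists : Int × Int × Int := (3, 5, 1)

def Spec_num_playlists (N : Int) (M : Int) (B : Int) (out : Int) : Prop := out = num_playlists_alt N M B
instance (N : Int) (M : Int) (B : Int) (out : Int) : Decidable (Spec_num_playlists N M B out) := by
  unfold Spec_num_playlists; infer_instance

-- ===== CLAIM (what is proved, stated in full; the proofs are below) =====
def Claim_equal_num_playlists : Prop := ∀ (N : Int) (M : Int) (B : Int), Dom_num_playlists N M B → Pre_num_playlists N M B → Spec_num_playlists N M B (num_playlists N M B)

-- ===== LEMMAS AND PROOFS =====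

-- The DP table entry dp[i][j] as a recursive function (A's recurrence verbatim).
def dpf (N B : Int) : Nat → Nat → Int
  | 0, 0 => 1
  | 0, _+1 => 0
  | _+1, 0 => 0
  | i+1, j+1 =>
    if ((j:Int)+1) > ((i:Int)+1) then 0
    else if ((j:Int)+1) ≤ B then
      dpf N B i j * ((j:Int)+1) + dpf N B i (j+1) * (N - ((j:Int)+1))
    else
      dpf N B i j * (((j:Int)+1) - B) + dpf N B i (j+1) * (N - ((j:Int)+1))

-- product of the new-song coefficients f(1)…f(j), f(t) = t if t ≤ B else t - B
def Ff (B : Int) : Nat → Int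
  | 0 => 1
  | j+1 => Ff B j * (if ((j:Int)+1) ≤ B then ((j:Int)+1) else ((j:Int)+1) - B)

-- the alternating (Stirling-like) sum of B's formula
def Tsum (N : Int) (i j : Nat) : Int :=
  ∑ k ∈ Finset.range j, (-1)^k * ((j-1).choose k : Int) * (N - 1 - (k:Int))^(i-1)

theorem dpf_zero_right (N B : Int) (i : Nat) (hi : 1 ≤ i) : dpf N B i 0 = 0 := by
  obtain ⟨i', rfl⟩ : ∃ i', i = i' + 1 := ⟨i - 1, by omega⟩
  rfl

theorem dpf_gt (N B : Int) (i j : Nat) (h : i < j) : dpf N B i j = 0 := by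
  obtain ⟨j', rfl⟩ : ∃ j', j = j' + 1 := ⟨j - 1, by omega⟩
  cases i with
  | zero => rfl
  | succ i' =>
    show dpf N B (i'+1) (j'+1) = 0
    unfold dpf
    rw [if_pos (by push_cast; omega)]

theorem dpf_succ_succ (N B : Int) (i j : Nat) :
    dpf N B (i+1) (j+1) =
      if ((j:Int)+1) > ((i:Int)+1) then 0
      else if ((j:Int)+1) ≤ B then
        dpf N B i j * ((j:Int)+1) + dpf N B i (j+1) * (N - ((j:Int)+1))
      else
        dpf N B i j * (((j:Int)+1) - B) + dpf N B i (j+1) * (N - ((j:Int)+1)) := rfl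

theorem dpf_rec (N B : Int) (i j : Nat) (hj : 1 ≤ j) :
    dpf N B (i+1) j =
      (if (j:Int) ≤ B then (j:Int) else (j:Int) - B) * dpf N B i (j-1)
        + (N - (j:Int)) * dpf N B i j := by
  obtain ⟨j', rfl⟩ : ∃ j', j = j' + 1 := ⟨j - 1, by omega⟩
  rw [dpf_succ_succ]
  by_cases hgt : ((j':Int)+1) > ((i:Int)+1)
  · rw [if_pos hgt]
    simp only [Nat.add_sub_cancel]
    rw [dpf_gt N B i j' (by omega), dpf_gt N B i (j'+1) (by omega)]
    simp
  · rw [if_neg hgt]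
    simp only [Nat.add_sub_cancel, Nat.cast_add, Nat.cast_one]
    split_ifs <;> ring

theorem Tsum_one (N : Int) (m : Nat) :
    Tsum N 1 (m+1) = if m = 0 then 1 else 0 := by
  unfold Tsum
  simp only [Nat.add_sub_cancel, Nat.sub_self, pow_zero, mul_one]
  exact Int.alternating_sum_range_choose

theorem Tsum_single (N : Int) (i : Nat) : Tsum N i 1 = (N-1)^(i-1) := by
  unfold Tsum
  simp

theorem Tsum_rec (N : Int) (i m : Nat) (hi : 1 ≤ i) :
    Tsum N (i+1) (m+1) = (m:Int) * Tsum N i m + (N - ((m:Int)+1)) * Tsum N i (m+1) := by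
  unfold Tsum
  simp only [Nat.add_sub_cancel]
  have hpow : ∀ x : Int, x^i = x^(i-1) * x := by
    intro x
    conv_lhs => rw [show i = (i-1)+1 by omega]
    rw [pow_succ]
  have h1 : ∀ k ∈ Finset.range (m+1),
      (-1:Int)^k * (m.choose k : Int) * (N-1-(k:Int))^i
      = (N - ((m:Int)+1)) * ((-1)^k * (m.choose k : Int) * (N-1-(k:Int))^(i-1))
        + (m:Int) * ((-1)^k * (((m-1).choose k : Int)) * (N-1-(k:Int))^(i-1)) := by
    intro k hk
    have hk' : k ≤ m := by
      have := Finset.mem_range.mp hk; omega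
    have hNat : m.choose k * (m - k) = m * ((m-1).choose k) := by
      cases m with
      | zero => simp
      | succ m' => simpa [mul_comm] using (Nat.choose_mul_succ_eq m' k).symm
    have hch : (m.choose k : Int) * ((m:Int) - (k:Int)) = (m:Int) * (((m-1).choose k : Int)) := by
      rw [show ((m:Int) - (k:Int)) = ((m - k : Nat) : Int) by omega]
      exact_mod_cast hNat
    rw [hpow (N-1-(k:Int))]
    calc (-1:Int)^k * (m.choose k : Int) * ((N-1-(k:Int))^(i-1) * (N-1-(k:Int)))
        = (N - ((m:Int)+1)) * ((-1)^k * (m.choose k:Int) * (N-1-(k:Int))^(i-1))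
          + ((-1)^k * ((m.choose k:Int) * ((m:Int)-(k:Int))) * (N-1-(k:Int))^(i-1)) := by ring
      _ = _ := by rw [hch]; ring
  rw [Finset.sum_congr rfl h1, Finset.sum_add_distrib, ← Finset.mul_sum, ← Finset.mul_sum]
  have h2 : (m:Int) * ∑ k ∈ Finset.range (m+1), (-1:Int)^k * (((m-1).choose k : Int)) * (N-1-(k:Int))^(i-1)
      = (m:Int) * ∑ k ∈ Finset.range m, (-1:Int)^k * (((m-1).choose k : Int)) * (N-1-(k:Int))^(i-1) := by
    cases m with
    | zero => simp
    | succ m' =>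
      rw [Finset.sum_range_succ, Nat.choose_eq_zero_of_lt (by omega)]
      simp
  rw [h2]; ring

theorem main_identity (N B : Int) :
    ∀ i j : Nat, 1 ≤ i → 1 ≤ j →
      (Nat.factorial (j-1) : Int) * dpf N B i j = Ff B j * Tsum N i j := by
  intro i
  induction i with
  | zero => intro j h; omega
  | succ i ih =>
    rcases Nat.eq_zero_or_pos i with hi0 | hi1
    · -- base case i + 1 = 1
      subst hi0
      intro j _ hj
      match j, hj with
      | 1, _ =>
        have h11 : dpf N B 1 1 = if (1:Int) ≤ B then 1 else 1 - B := by
          rw [show dpf N B 1 1 = dpf N B (0+1) (0+1) from rfl, dpf_succ_succ]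
          norm_num [dpf]
        have hT1 : Tsum N 1 1 = 1 := by simpa using Tsum_one N 0
        have hFf1 : Ff B 1 = if (1:Int) ≤ B then 1 else 1 - B := by
          show Ff B 0 * _ = _
          norm_num [Ff]
        rw [h11, hT1, hFf1]
        simp [Nat.factorial]
      | (j'+2), _ =>
        rw [dpf_gt N B 1 (j'+2) (by omega), Tsum_one]
        simp
    · -- inductive step from i ≥ 1
      intro j _ hj
      match j, hj with
      | 1, _ =>
        have hrec := dpf_rec N B i 1 le_rfl
        rw [hrec]
        norm_num
        rw [dpf_zero_right N B i hi1]
        have hIH := ih 1 hi1 le_rfl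
        norm_num [Tsum_single] at hIH
        rw [Tsum_single, show (i+1)-1 = (i-1)+1 by omega, pow_succ, hIH]
        split_ifs <;> ring
      | (j'+2), _ =>
        have hrec := dpf_rec N B i (j'+2) (by omega)
        rw [hrec]
        have hIH1 := ih (j'+1) hi1 (by omega)
        have hIH2 := ih (j'+2) hi1 (by omega)
        have hT : Tsum N (i+1) (j'+2)
            = ((j'+1:Nat):Int) * Tsum N i (j'+1)
              + (N - (((j'+1:Nat):Int)+1)) * Tsum N i (j'+2) := Tsum_rec N i (j'+1) hi1
        have hcast : ((j'+1:Nat):Int)+1 = ((j'+2:Nat):Int) := by push_cast; ring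
        have hFf : Ff B (j'+2) = Ff B (j'+1) *
            (if ((j'+2:Nat):Int) ≤ B then ((j'+2:Nat):Int) else ((j'+2:Nat):Int) - B) := by
          rw [← hcast]; rfl
        have hfac : (Nat.factorial (j'+2-1) : Int) = ((j'+1:Nat):Int) * (Nat.factorial j' : Nat) := by
          rw [show j'+2-1 = j'+1 from rfl, Nat.factorial_succ]; push_cast; ring
        simp only [Nat.add_sub_cancel] at hIH1 hIH2 ⊢
        rw [show j'+2-1 = j'+1 from rfl] at hfac ⊢
        rw [hfac, hT, hFf]
        rw [show j'+2-1 = j'+1 from rfl, Nat.factorial_succ] at hIH2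
        set c := (if ((j'+2:Nat):Int) ≤ B then ((j'+2:Nat):Int) else ((j'+2:Nat):Int) - B) with hc
        push_cast at hIH1 hIH2 ⊢
        linear_combination (c * ((j':Int)+1)) * hIH1 + (N - (j':Int) - 2) * hIH2 + ((N:Int) - (j':Int) - 2) * Tsum N i (j'+2) * hFf

-- ---- port A evaluates to dpf ----

def entryF (N B : Int) (i j r c : Nat) : Int :=
  if r < i ∨ (r = i ∧ c ≤ j) then dpf N B r c else 0

def tab (N B : Int) (Mn Nn i j : Nat) : List (List Int) :=
  (List.range (Mn+1)).map (fun r => (List.range (Nn+1)).map (fun c => entryF N B i j r c))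

theorem tab_getD_row (N B : Int) (Mn Nn i j r : Nat) (hr : r ≤ Mn) :
    (tab N B Mn Nn i j).getD r [] = (List.range (Nn+1)).map (fun c => entryF N B i j r c) := by
  unfold tab
  rw [List.getD_eq_getElem?_getD]
  simp [List.getElem?_map, List.getElem?_range, Nat.lt_succ_iff, hr]

theorem tab_get (N B : Int) (Mn Nn i j r c : Nat) (hr : r ≤ Mn) (hc : c ≤ Nn) :
    pyA_get2 (tab N B Mn Nn i j) (r:Int) (c:Int) = entryF N B i j r c := by
  unfold pyA_get2
  rw [Int.toNat_natCast, Int.toNat_natCast, tab_getD_row N B Mn Nn i j r hr,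
    List.getD_eq_getElem?_getD]
  simp [List.getElem?_map, List.getElem?_range, Nat.lt_succ_iff, hc]

theorem tab_congr (N B : Int) (Mn Nn i j i' j' : Nat)
    (h : ∀ r c, r ≤ Mn → c ≤ Nn → entryF N B i j r c = entryF N B i' j' r c) :
    tab N B Mn Nn i j = tab N B Mn Nn i' j' := by
  unfold tab
  apply List.map_congr_left
  intro r hr
  have hr' := List.mem_range.mp hr
  apply List.map_congr_left
  intro c hc
  have hc' := List.mem_range.mp hc
  exact h r c (by omega) (by omega)

theorem set_tab_eq (N B : Int) (Mn Nn i j i' j' r c : Nat) (hr : r ≤ Mn) (hc : c ≤ Nn)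
    (hoth : ∀ r' c', r' ≤ Mn → c' ≤ Nn → (r' ≠ r ∨ c' ≠ c) →
      entryF N B i j r' c' = entryF N B i' j' r' c') :
    pyA_set2 (tab N B Mn Nn i j) (r:Int) (c:Int) (entryF N B i' j' r c)
      = tab N B Mn Nn i' j' := by
  unfold pyA_set2
  rw [Int.toNat_natCast, Int.toNat_natCast, tab_getD_row N B Mn Nn i j r hr]
  apply List.ext_getElem
  · simp [tab]
  · intro n h1 h2
    have hn : n < Mn + 1 := by simpa [tab] using h2
    rw [List.getElem_set]
    by_cases hnr : r = n
    · subst hnr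
      rw [if_pos rfl]
      apply List.ext_getElem
      · simp [tab]
      · intro m hm1 hm2
        have hm : m < Nn + 1 := by simpa [tab] using hm2
        rw [List.getElem_set]
        by_cases hmc : c = m
        · subst hmc
          rw [if_pos rfl]
          simp [tab, List.getElem_map, hm]
        · rw [if_neg hmc]
          simp only [tab, List.getElem_map, List.getElem_range]
          exact hoth r m (by omega) (by omega) (Or.inr (by omega))
    · rw [if_neg hnr]
      simp only [tab, List.getElem_map, List.getElem_range]
      apply List.map_congr_left
      intro m hm
      have hm' := List.mem_range.mp hm
      exact hoth n m (by omega) (by omega) (Or.inl (by omega))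

theorem cross_tab (N B : Int) (Mn Nn i : Nat) :
    tab N B Mn Nn i Nn = tab N B Mn Nn (i+1) 0 := by
  apply tab_congr
  intro r c hr hc
  unfold entryF
  by_cases hri : r < i + 1
  · rw [if_pos (show r < i ∨ (r = i ∧ c ≤ Nn) by omega), if_pos (Or.inl hri)]
  · rw [if_neg (show ¬(r < i ∨ (r = i ∧ c ≤ Nn)) by omega)]
    by_cases hr2 : r = i+1 ∧ c ≤ 0
    · rw [if_pos (Or.inr hr2)]
      obtain ⟨rfl, hc0⟩ := hr2
      obtain rfl : c = 0 := by omega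
      exact (dpf_zero_right N B (i+1) (by omega)).symm
    · rw [if_neg (show ¬(r < i+1 ∨ (r = i+1 ∧ c ≤ 0)) by omega)]

theorem init_eq (N B : Int) (Mn Nn : Nat) :
    pyA_set2 ((PySem.List.pyRange 0 ((Mn:Int)+1) 1).map
        (fun _ => (PySem.List.pyRange 0 ((Nn:Int)+1) 1).map (fun _ => (0:Int)))) 0 0 1
      = tab N B Mn Nn 0 Nn := by
  rw [PySem.List.pyRange_one, PySem.List.pyRange_one,
    show (((Mn:Int)+1) - 0).toNat = Mn+1 by omega,
    show (((Nn:Int)+1) - 0).toNat = Nn+1 by omega]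
  unfold pyA_set2
  apply List.ext_getElem
  · simp [tab]
  · intro n h1 h2
    have hn : n < Mn + 1 := by simpa [tab] using h2
    rw [List.getElem_set]
    by_cases hn0 : (0:Int).toNat = n
    · rw [if_pos hn0]
      apply List.ext_getElem
      · simp [tab]
      · intro m hm1 hm2
        have hm : m < Nn + 1 := by simpa [tab] using hm2
        rw [List.getElem_set]
        simp only [tab, List.getElem_map, List.getElem_range]
        by_cases hm0 : (0:Int).toNat = m
        · rw [if_pos hm0]
          unfold entryF
          rw [if_pos (Or.inr ⟨by omega, by omega⟩)]
          obtain rfl : m = 0 := by simpa using hm0.symm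
          obtain rfl : n = 0 := by simpa using hn0.symm
          rfl
        · rw [if_neg hm0]
          obtain ⟨m', rfl⟩ : ∃ m', m = m' + 1 := ⟨m - 1, by simp at hm0; omega⟩
          simp only [List.getD_eq_getElem?_getD, List.getElem?_map, List.getElem?_range]
          obtain rfl : n = 0 := by simpa using hn0.symm
          unfold entryF
          rw [if_pos (Or.inr ⟨rfl, by omega⟩)]
          simp [hm, Nat.lt_succ_iff, dpf]
    · rw [if_neg hn0]
      simp only [List.getElem_map, List.getElem_range, tab]
      obtain ⟨n', rfl⟩ : ∃ n', n = n' + 1 := ⟨n - 1, by simp at hn0; omega⟩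
      unfold entryF
      rw [List.map_map]
      apply List.map_congr_left
      intro m hm
      rw [if_neg (by omega)]
      rfl

theorem step_tab (N B : Int) (Mn Nn i j : Nat) (hi1 : 1 ≤ i) (hiM : i ≤ Mn) (hj : j < Nn) :
    pyA_inner N B (i:Int) (tab N B Mn Nn i j) ((j:Int)+1) = tab N B Mn Nn i (j+1) := by
  have hset : pyA_set2 (tab N B Mn Nn i j) (i:Int) ((j:Int)+1) (dpf N B i (j+1))
      = tab N B Mn Nn i (j+1) := by
    rw [show ((j:Int)+1) = ((j+1:Nat):Int) by push_cast; ring]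
    have hv' : dpf N B i (j+1) = entryF N B i (j+1) i (j+1) := by
      unfold entryF
      rw [if_pos (Or.inr ⟨rfl, le_rfl⟩)]
    rw [hv']
    apply set_tab_eq N B Mn Nn i j i (j+1) i (j+1) hiM (by omega)
    intro r' c' hr' hc' hne
    unfold entryF
    split_ifs with h1 h2 h3
    · rfl
    · omega
    · omega
    · rfl
  have hread1 : pyA_get2 (tab N B Mn Nn i j) ((i:Int)-1) (((j:Int)+1)-1) = dpf N B (i-1) j := by
    rw [show ((i:Int)-1) = ((i-1:Nat):Int) by omega, show ((j:Int)+1-1) = ((j:Nat):Int) by ring,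
      tab_get N B Mn Nn i j (i-1) j (by omega) (by omega)]
    unfold entryF
    rw [if_pos (Or.inl (by omega))]
  have hread2 : pyA_get2 (tab N B Mn Nn i j) ((i:Int)-1) ((j:Int)+1) = dpf N B (i-1) (j+1) := by
    rw [show ((i:Int)-1) = ((i-1:Nat):Int) by omega,
      show ((j:Int)+1) = ((j+1:Nat):Int) by push_cast; ring,
      tab_get N B Mn Nn i j (i-1) (j+1) (by omega) (by omega)]
    unfold entryF
    rw [if_pos (Or.inl (by omega))]
  have hrec := dpf_rec N B (i-1) (j+1) (by omega)
  rw [show i-1+1 = i by omega] at hrec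
  unfold pyA_inner
  by_cases hgt : ((j:Int)+1) > (i:Int)
  · rw [if_pos hgt, show (0:Int) = dpf N B i (j+1) from (dpf_gt N B i (j+1) (by omega)).symm]
    exact hset
  · rw [if_neg hgt, hread1, hread2]
    have hcast : ((j+1:Nat):Int) = ((j:Int)+1) := by push_cast; ring
    rw [hcast, show (j+1)-1 = j from rfl] at hrec
    by_cases hB : ((j:Int)+1) ≤ B
    · rw [if_pos hB, show dpf N B (i-1) j * ((j:Int)+1) + dpf N B (i-1) (j+1) * (N - ((j:Int)+1)) = dpf N B i (j+1) by rw [hrec, if_pos hB]; ring]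
      exact hset
    · rw [if_neg hB, show dpf N B (i-1) j * (((j:Int)+1) - B) + dpf N B (i-1) (j+1) * (N - ((j:Int)+1)) = dpf N B i (j+1) by rw [hrec, if_neg hB]; ring]
      exact hset

theorem inner_fold (B : Int) (Mn Nn i : Nat) (hi1 : 1 ≤ i) (hiM : i ≤ Mn) :
    ∀ d j, j + d = Nn →
      (PySem.List.pyRange ((j:Int)+1) ((Nn:Int)+1) 1).foldl
          (pyA_inner (Nn:Int) B (i:Int)) (tab (Nn:Int) B Mn Nn i j)
        = tab (Nn:Int) B Mn Nn i Nn := by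
  intro d
  induction d with
  | zero =>
    intro j hj
    obtain rfl : j = Nn := by omega
    rw [PySem.List.pyRange_one_eq_nil (by omega)]
    rfl
  | succ d ihd =>
    intro j hj
    rw [PySem.List.pyRange_one_cons (by omega), List.foldl_cons,
      step_tab (Nn:Int) B Mn Nn i j hi1 hiM (by omega),
      show ((j:Int)+1)+1 = ((j+1:Nat):Int)+1 by push_cast; ring]
    exact ihd (j+1) (by omega)

theorem outer_fold (B : Int) (Mn Nn : Nat) :
    ∀ d i, i + d = Mn →
      (PySem.List.pyRange ((i:Int)+1) ((Mn:Int)+1) 1).foldl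
          (pyA_outer (Nn:Int) B) (tab (Nn:Int) B Mn Nn i Nn)
        = tab (Nn:Int) B Mn Nn Mn Nn := by
  intro d
  induction d with
  | zero =>
    intro i hi
    obtain rfl : i = Mn := by omega
    rw [PySem.List.pyRange_one_eq_nil (by omega)]
    rfl
  | succ d ihd =>
    intro i hi
    rw [PySem.List.pyRange_one_cons (by omega), List.foldl_cons]
    have hbody : pyA_outer (Nn:Int) B (tab (Nn:Int) B Mn Nn i Nn) ((i:Int)+1)
        = tab (Nn:Int) B Mn Nn (i+1) Nn := by
      unfold pyA_outer
      rw [cross_tab, show ((i:Int)+1) = ((i+1:Nat):Int) by push_cast; ring]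
      have h := inner_fold B Mn Nn (i+1) (by omega) (by omega) Nn 0 (by omega)
      rw [show ((0:Nat):Int)+1 = (1:Int) by norm_num] at h
      exact h
    rw [hbody, show ((i:Int)+1)+1 = ((i+1:Nat):Int)+1 by push_cast; ring]
    exact ihd (i+1) (by omega)

theorem portA_eq_dpf (B : Int) (Mn Nn : Nat) :
    num_playlists (Nn : Int) (Mn : Int) B = dpf (Nn : Int) B Mn Nn := by
  unfold num_playlists
  dsimp only
  rw [init_eq (Nn:Int) B Mn Nn]
  have h := outer_fold B Mn Nn Mn 0 (by omega)
  rw [show ((0:Nat):Int)+1 = (1:Int) by norm_num] at h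
  rw [h, tab_get (Nn:Int) B Mn Nn Mn Nn Mn Nn le_rfl le_rfl]
  unfold entryF
  rw [if_pos (Or.inr ⟨rfl, le_rfl⟩)]

-- ---- port B evaluates to the closed form ----

theorem Pfold (B : Int) (n : Nat) :
    (PySem.List.pyRange 1 ((n:Int)+1) 1).foldl (fun P j => P * (if j ≤ B then j else j - B)) 1
      = Ff B n := by
  induction n with
  | zero =>
    have h0 : PySem.List.pyRange 1 (((0:Nat):Int)+1) 1 = [] := PySem.List.pyRange_one_eq_nil (by omega)
    rw [h0]; rfl
  | succ n ih =>
    rw [show ((n+1:Nat):Int)+1 = ((n:Int)+1)+1 by push_cast; ring,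
      PySem.List.pyRange_one_succ_right (by omega), List.foldl_append, ih]
    rfl

theorem pyRange_map_sum (g : Int → Int) (n : Nat) :
    ((PySem.List.pyRange 0 (n:Int) 1).map g).sum = ∑ k ∈ Finset.range n, g (k:Int) := by
  induction n with
  | zero =>
    have h0 : PySem.List.pyRange 0 ((0:Nat):Int) 1 = [] := PySem.List.pyRange_one_eq_nil (by omega)
    rw [h0]; rfl
  | succ n ih =>
    rw [show ((n+1:Nat):Int) = (n:Int)+1 by push_cast; ring,
      PySem.List.pyRange_one_succ_right (by omega), List.map_append, List.sum_append,
      Finset.sum_range_succ, ih]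
    simp

theorem portB_eq (B : Int) (Mn Nn : Nat) (hN : 1 ≤ Nn) (hM : Nn ≤ Mn) :
    num_playlists_alt (Nn : Int) (Mn : Int) B =
      PySem.Int.floordiv (Ff B Nn * Tsum (Nn : Int) Mn Nn) ((Nat.factorial (Nn-1) : Int)) := by
  unfold num_playlists_alt
  rw [if_neg (show ¬((Nn:Int) = 0) by omega), if_neg (show ¬((Mn:Int) < (Nn:Int)) by omega)]
  have hP := Pfold B Nn
  have hS := pyRange_map_sum
    (fun k => (-1)^k.toNat * (((Nn:Int)-1).toNat.choose k.toNat : Int) * ((Nn:Int)-1-k)^(((Mn:Int)-1).toNat)) Nn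
  simp only [hP, hS]
  have hterm : ∀ k ∈ Finset.range Nn,
      (-1:Int)^((k:Int)).toNat * ((((Nn:Int)-1).toNat.choose ((k:Int)).toNat : Nat) : Int)
          * ((Nn:Int)-1-(k:Int))^(((Mn:Int)-1).toNat)
        = (-1:Int)^k * (((Nn-1).choose k : Nat) : Int) * ((Nn:Int)-1-(k:Int))^(Mn-1) := by
    intro k _
    rw [Int.toNat_natCast, show ((Nn:Int)-1).toNat = Nn-1 by omega,
      show ((Mn:Int)-1).toNat = Mn-1 by omega]
  rw [Finset.sum_congr rfl hterm, show ((Nn:Int)-1).toNat = Nn-1 by omega]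
  rfl

-- ===== VERDICT (by name: the statement is the Claim_ definition above) =====
theorem num_playlists_spec : Claim_equal_num_playlists := by
  intro N M B _ hPre
  obtain ⟨hN, hM⟩ := hPre
  obtain ⟨Nn, rfl⟩ : ∃ n : Nat, N = (n : Int) := ⟨N.toNat, (Int.toNat_of_nonneg hN).symm⟩
  obtain ⟨Mn, rfl⟩ : ∃ n : Nat, M = (n : Int) := ⟨M.toNat, (Int.toNat_of_nonneg hM).symm⟩
  show num_playlists _ _ _ = num_playlists_alt _ _ _
  rw [portA_eq_dpf]
  rcases Nat.eq_zero_or_pos Nn with hN0 | hN1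
  · subst hN0
    rcases Nat.eq_zero_or_pos Mn with hM0 | hM1
    · subst hM0; rfl
    · rw [dpf_zero_right _ _ _ hM1]
      simp [num_playlists_alt]
      omega
  · rcases Nat.lt_or_ge Mn Nn with hMN | hMN
    · rw [dpf_gt _ _ _ _ hMN]
      simp [num_playlists_alt]
      omega
    · rw [portB_eq _ _ _ hN1 hMN]
      have hid := main_identity ((Nn:Int)) B Mn Nn (by omega) hN1
      rw [← hid]
      have hfac : (0:Int) < (Nat.factorial (Nn-1) : Int) := by
        exact_mod_cast Nat.factorial_pos (Nn-1)
      rw [PySem.Int.floordiv_eq_ediv_of_pos hfac,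
        Int.mul_ediv_cancel_left _ (by exact_mod_cast Nat.factorial_ne_zero (Nn-1))]
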